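-- pv_equiv track=rewrite | github.com/Matheuscastro1903/Algoritmos_classicos | Algoritmos_numeros/exercicio(divisivel9).py | divisivel_nove
-- ===== SOURCE A (Python) =====
-- def divisivel_nove(n):
--     if n==9 or n==0:
--         return "É divisível"
--     if n<9 and n!=0:
--         #caso o valor da soma seja menor que 9,então já sabemos que não é divisível
--         return "Não é divisível"
--     else:
--         lista_numeros=[]
--         #para transformar um número inteiro em lista precisa interar com um for,transformando primeiro a
--         #entrada em string e retransformando em inteiro no loop
--
--         for i in str(n):
--             i=int(i)
--             lista_numeros.append(i)
--
--         soma=sum(lista_numeros)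
--
--         #return serve para parar a execução por um tempo e e você não colocasse o return,
--         # a função chamaria a próxima execução mas não retornaria o valor final para a chamada anterior
--         return divisivel_nove(soma)
-- ===== SOURCE B (Python) =====
-- def divisivel_nove(n):
--     return "É divisível" if n % 9 == 0 else "Não é divisível"
-- ===== Notes on version B (the rewrite author's own statement) =====
-- stated objective: simpler
-- what changed: Replaces the recursive string/digit-sum reduction with the direct divisibility test n % 9 == 0 (digit sums preserve the residue mod 9), a branch-free one-liner.
-- intended difference: On negative multiples of 9 (e.g. -9) A falls into its n<9 early-exit and returns 'Não é divisível', while B returns 'É divisível', which is the mathematically intended answer since such numbers are divisible by 9. — e.g. on divisivel_nove(-9): A returns "Não é divisível", B returns "É divisível"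
import Mathlib
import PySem

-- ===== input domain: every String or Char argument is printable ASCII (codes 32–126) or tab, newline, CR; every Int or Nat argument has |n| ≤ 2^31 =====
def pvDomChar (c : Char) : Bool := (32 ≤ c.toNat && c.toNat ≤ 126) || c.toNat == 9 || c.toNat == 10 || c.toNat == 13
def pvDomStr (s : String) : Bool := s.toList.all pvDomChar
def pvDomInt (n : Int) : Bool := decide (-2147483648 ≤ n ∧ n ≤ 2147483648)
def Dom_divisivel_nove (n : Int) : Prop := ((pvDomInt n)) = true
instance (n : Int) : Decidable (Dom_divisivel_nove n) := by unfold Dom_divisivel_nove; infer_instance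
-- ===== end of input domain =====

-- B replaces A's recursive digit-sum reduction by the direct test n % 9 == 0 (simpler, closed form);
-- on negative multiples of 9 A's early n<9 exit is wrong and B returns the intended answer (see D_ below).

-- ===== PORT A =====
-- fuel-based transcription of A's recursion; n.natAbs + 1 fuel is always enough
-- (the digit sum of n strictly decreases n when n ≥ 10), so the fuel-exhausted arm is unreachable.
def divisivelGoA : Nat → Int → String
  | 0, _ => "Não é divisível"  -- unreachable fuel guard
  | fuel + 1, n =>
    if n == 9 || n == 0 then "É divisível"
    else if n < 9 && n != 0 then "Não é divisível"
    else
      -- lista_numeros built by the for-loop over str(n); int(i) on a digit char never raises here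
      let lista_numeros : List Int :=
        (PySem.Int.toStr n).toList.foldl
          (fun acc c => acc ++ [(PySem.Int.ofChars? [c]).getD 0]) []
      let soma := lista_numeros.sum
      divisivelGoA fuel soma

def divisivel_nove (n : Int) : String := divisivelGoA (n.natAbs + 1) n

-- ===== PORT B =====
def divisivel_nove_alt (n : Int) : String :=
  if PySem.Int.mod n 9 == 0 then "É divisível" else "Não é divisível"

-- ===== PRECONDITION & SPEC =====
-- On negative multiples of 9, A's n<9 early exit returns "Não é divisível" although the number is
-- divisible by 9; B returns "É divisível", the intended answer.
def D_divisivel_nove (n : Int) : Prop := n < 0 ∧ n % 9 = 0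
instance (n : Int) : Decidable (D_divisivel_nove n) := by unfold D_divisivel_nove; infer_instance

def Spec_divisivel_nove (n : Int) (out : String) : Prop := ¬ D_divisivel_nove n → out = divisivel_nove_alt n
instance (n : Int) (out : String) : Decidable (Spec_divisivel_nove n out) := by unfold Spec_divisivel_nove; infer_instance

def pvDiffWitness_divisivel_nove : Int := (-9)
def pvDiffWitnessOut_divisivel_nove : String × String := ("Não é divisível", "É divisível")

-- ===== CLAIM (what is proved, stated in full; the proofs are below) =====
def Claim_unchanged_divisivel_nove : Prop := ∀ (n : Int), Dom_divisivel_nove n → Spec_divisivel_nove n (divisivel_nove n)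
def Claim_changed_divisivel_nove : Prop := Dom_divisivel_nove (pvDiffWitness_divisivel_nove) ∧ D_divisivel_nove (pvDiffWitness_divisivel_nove) ∧ divisivel_nove (pvDiffWitness_divisivel_nove) = pvDiffWitnessOut_divisivel_nove.1 ∧ divisivel_nove_alt (pvDiffWitness_divisivel_nove) = pvDiffWitnessOut_divisivel_nove.2 ∧ pvDiffWitnessOut_divisivel_nove.1 ≠ pvDiffWitnessOut_divisivel_nove.2
def Claim_exact_divisivel_nove : Prop := ∀ (n : Int), Dom_divisivel_nove n → D_divisivel_nove n → divisivel_nove n ≠ divisivel_nove_alt n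

-- ===== LEMMAS AND PROOFS =====

-- value of a single digit char, as the port computes it
lemma chval_digitChar (d : Nat) (h : d < 10) :
    (PySem.Int.ofChars? [Nat.digitChar d]).getD 0 = (d : Int) := by
  interval_cases d <;> decide

lemma core_sum (fuel : Nat) : ∀ (n : Nat) (ds : List Char), n < fuel →
    ((Nat.toDigitsCore 10 fuel n ds).map (fun c => (PySem.Int.ofChars? [c]).getD 0)).sum
      = ((Nat.digits 10 n).sum : Int)
        + ((ds.map (fun c => (PySem.Int.ofChars? [c]).getD 0)).sum) := by
  induction fuel with
  | zero => intro n ds h; omega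
  | succ fuel ih =>
    intro n ds h
    rw [Nat.toDigitsCore]
    by_cases hz : n / 10 = 0
    · have hd : n < 10 := by omega
      simp only [hz, if_true, List.map_cons, List.sum_cons, Nat.mod_eq_of_lt hd,
        chval_digitChar n hd]
      rcases Nat.eq_zero_or_pos n with h0 | h0
      · subst h0; simp
      · rw [Nat.digits_of_lt 10 n (by omega) hd]
        simp
    · simp only [hz, if_false]
      have hlt : n / 10 < fuel := by
        have : n / 10 < n := Nat.div_lt_self (by omega) (by norm_num)
        omega
      rw [ih (n / 10) _ hlt]
      have hn0 : 0 < n := by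
        rcases Nat.eq_zero_or_pos n with h0 | h0
        · exfalso; apply hz; simp [h0]
        · exact h0
      rw [Nat.digits_def' (by norm_num : 1 < 10) hn0]
      simp [chval_digitChar (n % 10) (Nat.mod_lt _ (by norm_num))]
      ring

-- the sum A's loop builds, for nonnegative n, is the base-10 digit sum
lemma soma_eq (n : Int) (h : 0 ≤ n) :
    ((PySem.Int.toStr n).toList.foldl
        (fun acc c => acc ++ [(PySem.Int.ofChars? [c]).getD 0]) []).sum
      = ((Nat.digits 10 n.toNat).sum : Int) := by
  rw [PySem.Int.toList_toStr, PySem.List.foldl_append_singleton_eq_map]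
  have : PySem.Int.toChars n = Nat.toDigits 10 n.toNat := by
    simp [PySem.Int.toChars, not_lt.2 h]
  rw [this, Nat.toDigits]
  simp only [List.nil_append]
  rw [core_sum (n.toNat + 1) n.toNat [] (by omega)]
  simp

lemma sum_digits_lt (m : Nat) (h : 10 ≤ m) : (Nat.digits 10 m).sum < m := by
  rw [Nat.digits_def' (by norm_num : 1 < 10) (by omega)]
  have h1 := Nat.digit_sum_le 10 (m / 10)
  have h2 := Nat.div_add_mod m 10
  have h3 : 1 ≤ m / 10 := by omega
  simp only [List.sum_cons]
  omega

-- B's port depends only on n mod 9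
lemma alt_congr (a b : Int) (h : a % 9 = b % 9) :
    divisivel_nove_alt a = divisivel_nove_alt b := by
  simp only [divisivel_nove_alt,
    PySem.Int.mod_eq_emod_of_pos (a := a) (by norm_num : (0:Int) < 9),
    PySem.Int.mod_eq_emod_of_pos (a := b) (by norm_num : (0:Int) < 9), h]

lemma go_eq : ∀ (k : Nat) (n : Int), 0 ≤ n → n.toNat ≤ k →
    divisivelGoA (k + 1) n = divisivel_nove_alt n := by
  intro k
  induction k with
  | zero =>
    intro n h0 hk
    have : n = 0 := by omega
    subst this; decide
  | succ k ih =>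
    intro n h0 hk
    rw [divisivelGoA]
    by_cases h9 : n = 9
    · subst h9; simp; decide
    by_cases hz : n = 0
    · subst hz; simp; decide
    by_cases hlt : n < 9
    · -- 1 ≤ n ≤ 8 : both say "Não é divisível"
      have hbr : (n == 9 || n == 0) = false := by simp [h9, hz]
      have hbr2 : (n < 9 && n != 0) = true := by simp [hlt, hz]
      simp only [hbr, Bool.false_eq_true, if_false, hbr2, if_true]
      have hdvd : ¬ (9:Int) ∣ n := by omega
      simp [divisivel_nove_alt, hdvd]
    · -- n ≥ 10 : A recurses on the digit sum, which keeps the residue mod 9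
      have h10 : 10 ≤ n := by omega
      have hbr : (n == 9 || n == 0) = false := by simp [h9, hz]
      have hbr2 : (n < 9 && n != 0) = false := by simp [hlt]
      simp only [hbr, Bool.false_eq_true, if_false, hbr2]
      rw [soma_eq n h0]
      set s : Int := ((Nat.digits 10 n.toNat).sum : Int) with hs
      have h10n : 10 ≤ n.toNat := by omega
      have hslt : (Nat.digits 10 n.toNat).sum < n.toNat := sum_digits_lt _ h10n
      have hs0 : 0 ≤ s := by positivity
      have hstn : s.toNat ≤ k := by omega
      rw [ih s hs0 hstn]
      apply alt_congr
      have hmod : (Nat.digits 10 n.toNat).sum % 9 = n.toNat % 9 :=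
        (Nat.modEq_nine_digits_sum n.toNat).symm
      have hcg : ((Nat.digits 10 n.toNat).sum : Int) % 9 = ((n.toNat : Int)) % 9 := by
        exact_mod_cast hmod
      rw [hs]
      conv_rhs => rw [← Int.toNat_of_nonneg h0]
      exact hcg

-- ===== VERDICT (by name: the statement is the Claim_ definition above) =====
theorem divisivel_nove_spec : Claim_unchanged_divisivel_nove := by
  intro n _ hd
  by_cases h0 : 0 ≤ n
  · show divisivelGoA (n.natAbs + 1) n = divisivel_nove_alt n
    exact go_eq n.natAbs n h0 (by omega)
  · -- n < 0 and (by ¬D_) n % 9 ≠ 0 : both return "Não é divisível"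
    have hneg : n < 0 := by omega
    have hmod : n % 9 ≠ 0 := fun h => hd ⟨hneg, h⟩
    show divisivelGoA (n.natAbs + 1) n = divisivel_nove_alt n
    rw [divisivelGoA]
    have hbr : (n == 9 || n == 0) = false := by
      simp only [Bool.or_eq_false_iff, beq_eq_false_iff_ne]; omega
    have hbr2 : (n < 9 && n != 0) = true := by
      simp only [Bool.and_eq_true, decide_eq_true_eq, bne_iff_ne]; omega
    simp only [hbr, Bool.false_eq_true, if_false, hbr2, if_true]
    have hdvd : ¬ (9:Int) ∣ n := by omega
    simp [divisivel_nove_alt, hdvd]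

theorem divisivel_nove_changed : Claim_changed_divisivel_nove := by
  unfold Claim_changed_divisivel_nove; decide

theorem divisivel_nove_tight : Claim_exact_divisivel_nove := by
  intro n _ hd
  obtain ⟨hneg, hmod⟩ := hd
  have hA : divisivel_nove n = "Não é divisível" := by
    show divisivelGoA (n.natAbs + 1) n = _
    rw [divisivelGoA]
    have hbr : (n == 9 || n == 0) = false := by
      simp only [Bool.or_eq_false_iff, beq_eq_false_iff_ne]; omega
    have hbr2 : (n < 9 && n != 0) = true := by
      simp only [Bool.and_eq_true, decide_eq_true_eq, bne_iff_ne]; omega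
    simp [hbr, hbr2]
  have hB : divisivel_nove_alt n = "É divisível" := by
    have hdvd : (9:Int) ∣ n := by omega
    simp [divisivel_nove_alt, hdvd]
  rw [hA, hB]; decide
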